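/-
  THE COMPILED EXAMPLES OF Vorbis/INVARIANT-GUIDE.md: one example for every sentence of the guide that makes a claim.
      §2  USE: a clause at a check site in three lines; the access; a value lemma, then the site; an object of the own frame
      §3  CARRY: one group over an allocator call; the whole CONFIG part over a batch of decode-time stores (a field of `*f`, a channel
          buffer, the temp block); re-assembling `VorbisOK`; the block predicate grows; the coarse frame; the transport `*f = p`
      §5  the traps
-/
import Vorbis.Invariant
namespace Vorbis.InvariantGuideExamples
open X86 X86.User Asan Vorbis

/-! ### §2 USE -/

/-- **Three lines.** do_floor: `__asan_load2_noabort(&g->Xlist[j])`, the address as the stepper left it (`rdi = g + j*2 + 338`). The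
clause (FL2, through `FloorShape.site_Xlist`), the index bound, `ha`; then the check in register form. -/
example (len : Nat) (A : Arena × List Obj) (Blk : Block → Prop) (Live : Nat → Prop) (mem : Mem) (f g j : Nat) (s r : Int)
    (h : Real.FB len A Blk Live mem f s r) (hg : IsFloor mem f g) (hj : j < 250) :
    AccessibleSmall mem (addr (g + j * 2 + 338)).toNat 2 := by
  have hfl : FloorShape Blk mem f := h.vorbis.floor.toFloorShape
  have st : Site Live (g + j * 2 + 338) 2 := hfl.site_Xlist h.env.live hg (j := j) (by simp only [voff]; omega)
    (by simp only [voff]; omega)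
  exact st.acc_addr h.env.covers

/-- The access that follows the check, and the plain inequalities. -/
example (len : Nat) (A : Arena × List Obj) (Blk : Block → Prop) (Live : Nat → Prop) (mem : Mem) (f g j : Nat) (s r : Int)
    (L : Layout) (hL : 0xC00000 ≤ L.hi) (h : Real.FB len A Blk Live mem f s r) (hg : IsFloor mem f g) (hj : j < 250) :
    L.Has (addr (g + j * 2 + 338)) 2 ∧ g + j * 2 + 338 + 2 ≤ 0xC00000 := by
  have st : Site Live (g + j * 2 + 338) 2 := h.vorbis.floor.toFloorShape.site_Xlist h.env.live hg (j := j)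
    (by simp only [voff]; omega) (by simp only [voff]; omega)
  exact ⟨st.has h.env.covers hL, (st.inside h.env.covers).2⟩

/-- A field of `*f`: `f->valid_bits` at `f + 1768`. -/
example (len : Nat) (Blk : Block → Prop) (Live : Nat → Prop) (mem : Mem) (f : Nat) (hc : Covers Live mem)
    (hL : BlkLive Blk Live) (h : Bits Blk len mem f) : AccessibleSmall mem (f + 1768) 4 :=
  (h.site_field hL 1768 4 (by omega) (by omega) rfl).acc hc

/-- **An index that comes out of a table**: first the VALUE lemma, then the site. DECODE_RAW's fast path: `var = c->fast_huffman[k]`,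
`var ≥ 0` after the sign test, then `c->codeword_lengths[var]` (K5 inside `site_lengths_of_fast`). -/
example (Blk : Block → Prop) (Live : Nat → Prop) (mem : Mem) (c k : Nat) (hc : Covers Live mem) (hL : BlkLive Blk Live)
    (h : CodebookOK Blk mem c) (hk : k < 1024) (hv : 0 ≤ Codebook.fast_huffman mem c k) :
    AccessibleSmall mem (mem.u64 (c + 8) + (mem.i16 (c + 48 + 2 * k)).toNat) 1 := by
  have st : Site Live (mem.u64 (c + 8) + (mem.i16 (c + 48 + 2 * k)).toNat) 1 :=
    h.site_lengths_of_fast hL k hk hv (by simp only [vacc, voff])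
  exact st.acc hc

/-- **An object of your own protected frame** is not in the invariant: it is live by the shadow layer. decode_residue's `c_inter`
(4 bytes at `base + 48` of its frame). -/
example (others : List Obj) (frames : List (Nat × FrameLayout)) (top : Nat) (mem : Mem) (base : Nat) (F : FrameLayout)
    (hs : ShadowInv others frames top mem) (hF : (base, F) ∈ frames) (ho : (⟨base + 48, 4, .stack⟩ : Obj) ∈ F.objsAt base) :
    AccessibleSmall mem (base + 48) 4 := by
  have st : Site (Live (stackObjs frames ++ others)) (base + 48) 4 :=
    Site.of_block (hs.live_frame hF ho) (Nat.le_refl _) (Nat.le_refl _) (by omega)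
  exact st.acc hs.covers

/-! ### §3 CARRY -/

/-- **Setup time, one finished group over an allocator call**: `setup_malloc` wrote `setup_offset` (`ObjSame`) and nothing of the
blocks the group reads; the arena grew (`runBlk_mono`). -/
example (A A' : Arena) (extra : List Block) (mem mem' : Mem) (f : Nat) (h : FloorsOK (runBlk A extra) mem f)
    (hs : ObjSame f mem mem') (hk : ∀ B, FloorsOK.Reads mem f B → B.Kept mem mem') (he : A.Extends A') :
    FloorsOK (runBlk A' extra) mem' f :=
  h.transfer (hs.sub (by decide)) hk (fun B _ hb => runBlk_mono he (fun _ hx => hx) B hb)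

/-- **Decode time, ONE store into a mutable field of `*f`** (`mov [rbx+0x6e8], eax`: `valid_bits`): CONFIG and SEP by
`frame_store`; `Bits` by its own update lemma (`store_valid_bits`); M7 and W1 read OTHER mutable fields (`previous_length`,
`discard_samples_deferred` are holes of `DecodeSame` too), so they are carried by the store's own `ObjEq`: one field of `*f` was
written, the others read the same (`M7Range.transfer`, `W1.transfer`). Then `Real.VorbisOK.of_config` puts it back together. -/
example (len : Nat) (Blk : Block → Prop) (mem : Mem) (f : Nat) (x : BitVec 32) (h : Real.VorbisOK len Blk mem f)
    (hok : BlkOK Blk) (hsep : Separated Blk mem f) (hx : -1 ≤ x.toInt ∧ x.toInt ≤ 32) :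
    Real.VorbisOK len Blk (mem.writeLE (addr (f + 1768)) 4 x.toNat) f ∧
      Separated Blk (mem.writeLE (addr (f + 1768)) 4 x.toNat) f := by
  have hin := (h.obj |> hok.inside _)
  simp only [vblock, voff] at hin
  -- CONFIG and SEP: the span is the hole `[1480, 1808)`
  obtain ⟨hc, hsep', _⟩ := h.config.frame_store hok h.obj hsep (f + 1768) 4 x.toNat (by omega)
    (StoreOK.hole (InHole.of_field f 1768 4 (by omega)))
  -- the mutable part: Bits by its own lemma; M7 and W1 read other fields of `*f`
  have e : (addr (f + 1768)).toNat = f + 1768 := toNat_addr _ (by omega)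
  have he : ObjEq [(152, 160), (1256, 1260), (1784, 1788)] mem f (mem.writeLE (addr (f + 1768)) 4 x.toNat) f := by
    apply ObjEq.of_writeLE mem f _ 4 x.toNat (by omega)
    · intro w hw
      simp only [List.mem_cons, List.mem_nil_iff, or_false] at hw
      rcases hw with rfl | rfl | rfl <;> simp only [] <;> omega
    · intro w hw
      simp only [List.mem_cons, List.mem_nil_iff, or_false] at hw
      rcases hw with rfl | rfl | rfl <;> simp only [] <;> omega
  exact ⟨Real.VorbisOK.of_config hc (h.bits.store_valid_bits x hx).1 (h.buffers.M7.transfer (he.sub (by decide)))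
    (h.w1.transfer (he.sub (by decide))), hsep'⟩

/-- **Decode time, a store into a channel buffer** (`channel_buffers[c][i] = …`, inverse coupling, the residue decode, the MDCT):
`StoreOK.buffer` with the buffer block of M6 (SEP says it meets no block the configuration reads, and not `*f`). -/
example (Blk : Block → Prop) (mem : Mem) (f c i v : Nat) (h : ConfigOK Blk mem f) (hok : BlkOK Blk)
    (hob : Blk (objBlock f)) (hsep : Separated Blk mem f) (hc : (c : Int) < stb_vorbis.channels mem f)
    (hi : i < bsize mem f 1) :
    ConfigOK Blk (mem.writeLE (addr (stb_vorbis.channel_buffers mem f c + 4 * i)) 4 v) f := by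
  have hC : Blk ⟨stb_vorbis.channel_buffers mem f c, 4 * bsize mem f 1⟩ := (h.m6 c hc).1
  have hin := hok.inside _ hC
  simp only [] at hin
  exact (h.frame_store hok hob hsep _ 4 v (by omega)
    (StoreOK.buffer _ (SampleBuf.chan c hc) (by simp only []; omega) (by simp only []; omega))).1

/-- **Decode time, a store into the temp block** (decode_residue's `part_classdata`, inverse_mdct's `buf2`): `StoreOK.off`, from the
arena layer (`ArenaOK.blk_tblock_disjoint`). Here `Blk` is the arena's predicate itself. -/
example (A : Arena) (others : List Obj) (mem : Mem) (f q m b k v : Nat) (hA : ArenaOK A others mem f)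
    (h : ConfigOK A.Blk mem f) (hob : A.Blk (objBlock f)) (hsep : Separated A.Blk mem f) (hT : A.TBlock q m)
    (h1 : q ≤ b) (h2 : b + k ≤ q + m) : ConfigOK A.Blk (mem.writeLE (addr b) k v) f := by
  have ht := hA.tblock_off hT
  apply (h.frame_store hA.blkOK hob hsep b k v (by omega) (StoreOK.off ?_)).1
  intro B hB
  have hd := hA.blk_tblock_disjoint hB hT
  simp only [vblock] at hd
  simp only []
  omega

/-- **A callee that only pushes and spills inside the stack region** (and the shadow stores of a prologue): the coarse frame of FB. -/
example (len : Nat) (A : Arena × List Obj) (Live : Nat → Prop) (mem mem' : Mem) (f : Nat) (s r : Int) (spans : List Span)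
    (h : Real.FB len A A.1.Blk Live mem f s r) (hs : Mem.SameExcept spans mem mem')
    (hin : ∀ w, w ∈ spans → 0x700000 ≤ w.lo ∧ w.hi ≤ 0x800000) (hado : ADO A.1 A.2 mem' f) :
    Real.FB len A A.1.Blk Live mem' f s r := by
  have hA : ArenaOK A.1 A.2 mem f := h.ado.ok
  apply Real.FB.carry h (hA.allKept_of_stack hs hin) _ hado
  apply hs.eqOn
  intro w hw
  have := hin w hw
  omega

/-- **The transport `*f = p`** (stb_vorbis_open_memory after `memcpy(f, &p, 1808)`): P5, hence the first frame boundary. -/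
example (len : Nat) (A' : Arena × List Obj) (Blk Blk' : Block → Prop) (Live' : Nat → Prop) (mem mem' : Mem) (p f : Nat)
    (hm : Move Blk Blk' mem mem' p f) (henv : Env Blk' Live' mem) (h : Real.VorbisOK len Blk mem p)
    (hado : ADO A'.1 A'.2 mem p) (hself : A'.1.Blk (objBlock f)) (hfirst : stb_vorbis.first_decode mem p = 1) :
    Real.FB len A' Blk' Live' mem' f 0 0 :=
  (Real.P5.of_move hm henv h hado hself hfirst).fb

/-- **Only the block predicate changed**: stb_vorbis_open_memory returns, its stack object `p` leaves `Blk`. -/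
example (len : Nat) (A : Arena) (p : Nat) (mem : Mem) (f : Nat) (h : Real.VorbisOK len (runBlk A (objBlock p :: fixedBlocks len)) mem f)
    (hok : BlkOK (runBlk A (objBlock p :: fixedBlocks len))) (hself : A.Blk (objBlock f))
    (harena : ∀ B, ConfigOK.Owns mem f B → runBlk A (objBlock p :: fixedBlocks len) B → A.Blk B) :
    Real.VorbisOK len (runBlk A (fixedBlocks len)) mem f :=
  h.reblk hok (fun B hO hb => runBlk_setup (harena B hO hb)) (runBlk_setup hself) (runBlk_extra (fixed_in len))

/-! ### §5 The traps -/

/-- `omega` does not see through projections: `simp only [vblock]` first. -/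
example (B C : Block) (hd : B.disjoint C) (a : Nat) (h1 : C.base ≤ a) (h2 : a < C.base + C.size) :
    a < B.base ∨ B.base + B.size ≤ a := by
  simp only [vblock] at hd
  omega

/-- `omega` is linear: generalize the product first (or use the owner's product lemma, here `mult_index_lt`). -/
example (z N i d : Nat) (hz : z < N) (hi : i < d) : 4 * (z * d + i) + 4 ≤ 4 * (N * d) := by
  have h := mult_index_lt hz hi
  generalize z * d = x at *
  generalize N * d = y at *
  omega

/-- `&&&` binds weaker than `+`: parenthesise. -/
example (acc : Nat) : (acc &&& 1023) + 1 ≤ 1024 := by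
  have := and_1023_lt acc
  omega

/-- A field at offset 0 has no `+ 0` after `simp only [vacc, voff]`: `he.u32_0`. -/
example (mem mem' : Mem) (p f : Nat) (he : ObjEq HeaderOK.wins mem p mem' f) :
    stb_vorbis.sample_rate mem' f = stb_vorbis.sample_rate mem p := by
  simp only [vacc, voff]
  exact he.u32_0 (by decide)

/-- `by decide` needs numerals; for an array element of `*f` with a variable index name the window. -/
example (mem mem' : Mem) (f i : Nat) (hd : DecodeSame f mem mem') (hi : i < 64) :
    stb_vorbis.floor_types mem' f i = stb_vorbis.floor_types mem f i := by
  simp only [vacc, voff]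
  exact hd.u16_at (180 + 2 * i) (InWins.of_mem (144, 1000) (by decide) (by simp only []; omega) (by simp only []; omega))
    (by omega) (by omega)

/-- Counts are `Int` fields, sizes are `Nat`: the range clause in context, then `omega`. -/
example (Blk : Block → Prop) (mem : Mem) (f i : Nat) (h : ResidueOK Blk mem f)
    (hi : (i : Int) < stb_vorbis.residue_count mem f) : 32 * i + 32 ≤ 32 * (stb_vorbis.residue_count mem f).toNat := by
  have h1 := h.R1
  omega

#print axioms Real.VorbisOK.frame_stores
#print axioms Real.VorbisOK.moves
#print axioms groups_laws
#print axioms ConfigOK.frame_stores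

end Vorbis.InvariantGuideExamples
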